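-- pv_equiv track=rewrite | github.com/valanto/adventOfCode | 2020/day10/script.py | combo_check
-- ===== SOURCE A (Python) =====
-- def combo_check(adapters, end, joltage=0):
--     if joltage + 3 >= end:
--         return True
--
--     if len(adapters) == 0:
--         return False
--
--     adapter = adapters.pop(0)
--     if adapter - joltage <= 3:
--         return combo_check(adapters, end, adapter)
--
--     return False
-- ===== SOURCE B (Python) =====
-- def combo_check(adapters, end, joltage=0):
--     # Pure for-loop over the list; A mutates its argument (pop(0)), B does not:
--     # equivalence is about the return value only.
--     for adapter in adapters:
--         if joltage + 3 >= end:
--             return True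
--         if adapter - joltage > 3:
--             return False
--         joltage = adapter
--     return joltage + 3 >= end
-- ===== Notes on version B (the rewrite author's own statement) =====
-- stated objective: idiomatic
-- what changed: Replaces tail recursion with front-pop mutation by a pure for-loop over the list with a joltage accumulator and a single final condition instead of separate empty-list/last-step exits; return value only (A mutates its argument, B does not).
import Mathlib
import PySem

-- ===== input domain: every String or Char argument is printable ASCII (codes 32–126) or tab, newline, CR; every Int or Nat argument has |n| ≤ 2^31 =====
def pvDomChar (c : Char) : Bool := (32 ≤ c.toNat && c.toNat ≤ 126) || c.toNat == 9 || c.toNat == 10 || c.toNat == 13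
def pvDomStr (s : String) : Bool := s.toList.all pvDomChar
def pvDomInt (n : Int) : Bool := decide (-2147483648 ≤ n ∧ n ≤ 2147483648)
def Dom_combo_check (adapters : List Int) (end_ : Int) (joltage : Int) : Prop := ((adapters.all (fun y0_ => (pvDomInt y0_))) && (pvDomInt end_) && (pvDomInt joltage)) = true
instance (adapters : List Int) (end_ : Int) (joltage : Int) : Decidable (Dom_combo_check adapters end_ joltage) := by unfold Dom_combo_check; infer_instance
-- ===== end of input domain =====

-- B replaces A's tail recursion (with front-pop mutation) by a pure for-loop with a
-- joltage accumulator; equivalence is about the return value only (A mutates its argument).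

-- ===== PORT A =====
def combo_check (adapters : List Int) (end_ : Int) (joltage : Int) : Bool :=
  if joltage + 3 ≥ end_ then true
  else match adapters with
    | [] => false
    | adapter :: rest =>
      if adapter - joltage ≤ 3 then combo_check rest end_ adapter
      else false

-- ===== PORT B =====
def combo_check_alt (adapters : List Int) (end_ : Int) (joltage : Int) : Bool :=
  match adapters with
  | [] => decide (joltage + 3 ≥ end_)
  | adapter :: rest =>
    if joltage + 3 ≥ end_ then true
    else if adapter - joltage > 3 then false
    else combo_check_alt rest end_ adapter

-- ===== PRECONDITION & SPEC =====
def Spec_combo_check (adapters : List Int) (end_ : Int) (joltage : Int) (out : Bool) : Prop := out = combo_check_alt adapters end_ joltage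
instance (adapters : List Int) (end_ : Int) (joltage : Int) (out : Bool) : Decidable (Spec_combo_check adapters end_ joltage out) := by unfold Spec_combo_check; infer_instance

-- ===== CLAIM (what is proved, stated in full; the proofs are below) =====
def Claim_equal_combo_check : Prop := ∀ (adapters : List Int) (end_ : Int) (joltage : Int), Dom_combo_check adapters end_ joltage → Spec_combo_check adapters end_ joltage (combo_check adapters end_ joltage)

-- ===== LEMMAS AND PROOFS =====
theorem combo_check_eq_alt (adapters : List Int) (end_ : Int) (joltage : Int) :
    combo_check adapters end_ joltage = combo_check_alt adapters end_ joltage := by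
  induction adapters generalizing joltage with
  | nil =>
    simp only [combo_check, combo_check_alt]
    split_ifs <;> simp_all
  | cons a rest ih =>
    simp only [combo_check, combo_check_alt]
    split_ifs with h1 h2 h3 <;> first | rfl | omega | exact ih a

-- ===== VERDICT (by name: the statement is the Claim_ definition above) =====
theorem combo_check_spec : Claim_equal_combo_check := by
  intro adapters end_ joltage _
  exact combo_check_eq_alt adapters end_ joltage
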